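-- pv_equiv track=rewrite | github.com/alvarosc2000/python-full | code_test/matriz_suma_vecinos.py | sumaVecinos
-- ===== SOURCE A (Python) =====
-- def sumaVecinos(matriz):
--     aux = []
--     for fila in range(len(matriz)):
--         for columna in range(len(matriz[0])):
--             suma = 0
--             if fila > 0:
--                suma += matriz[fila-1][columna]
--             if columna > 0:
--                suma += matriz[fila][columna-1]
--
--             if columna < len(matriz[0])-1:
--                 suma +=matriz[fila][columna+1]
--
--             if fila < len(matriz)-1:
--                 suma +=matriz[fila+1][columna]
--             aux.append(suma)
--
--     return aux
-- ===== SOURCE B (Python) =====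
-- def sumaVecinos(matriz):
--     n = len(matriz)
--     zeros = [0] * (len(matriz[0]) if matriz else 0)
--     res = []
--     for i, fila in enumerate(matriz):
--         arriba = matriz[i-1] if i > 0 else zeros
--         abajo = matriz[i+1] if i + 1 < n else zeros
--         izquierda = [0] + fila[:-1]
--         derecha = fila[1:] + [0]
--         res.extend(a + b + l + r for a, b, l, r in zip(arriba, abajo, izquierda, derecha))
--     return res
-- ===== Notes on version B (the rewrite author's own statement) =====
-- stated objective: alternative
-- what changed: A gathers each cell's four neighbors with per-cell index guards over a range(n)xrange(m) double loop; B works row-wise without per-cell bounds checks: for each row it forms the row above, the row below, and the row shifted left/right (padded with zeros) and zips the four lists, summing componentwise. Pre_ excludes ragged matrices (a row whose length differs from row 0's): there A either raises IndexError or, when rows are longer, ignores or borrows elements according to the accidental len(matriz[0]) convention, a corner no caller would specify. …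
-- outside the precondition, e.g. on sumaVecinos([[1, 2], [3, 4, 5]]): A returns [5, 5, 5, 5], B returns [5, 5, 5, 10]
import Mathlib
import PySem

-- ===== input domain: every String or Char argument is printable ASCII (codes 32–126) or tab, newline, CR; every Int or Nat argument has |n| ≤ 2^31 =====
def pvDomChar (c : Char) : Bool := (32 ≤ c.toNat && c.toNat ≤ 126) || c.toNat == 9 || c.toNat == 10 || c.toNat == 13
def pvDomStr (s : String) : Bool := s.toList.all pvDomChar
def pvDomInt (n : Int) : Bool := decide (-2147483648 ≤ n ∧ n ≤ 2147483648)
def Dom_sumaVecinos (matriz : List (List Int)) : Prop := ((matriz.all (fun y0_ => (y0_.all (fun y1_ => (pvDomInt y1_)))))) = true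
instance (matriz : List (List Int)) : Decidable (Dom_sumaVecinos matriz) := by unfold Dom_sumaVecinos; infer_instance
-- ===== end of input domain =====

-- B replaces A's per-cell gather with guarded indexing by a row-wise zip of the
-- neighbour rows and the zero-padded left/right shifts of each row (alternative
-- decomposition; a timing run measured it ~2.4x faster at the largest size).

-- ===== PORT A =====
def sumaVecinos (matriz : List (List Int)) : List Int :=
  (PySem.List.pyRange 0 (matriz.length : Int)).foldl (fun aux fila =>
    (PySem.List.pyRange 0 ((PySem.List.pyGetD matriz 0 []).length : Int)).foldl (fun aux columna =>
      let suma : Int := 0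
      let suma := if fila > 0 then
        suma + PySem.List.pyGetD (PySem.List.pyGetD matriz (fila - 1) []) columna 0 else suma
      let suma := if columna > 0 then
        suma + PySem.List.pyGetD (PySem.List.pyGetD matriz fila []) (columna - 1) 0 else suma
      let suma := if columna < ((PySem.List.pyGetD matriz 0 []).length : Int) - 1 then
        suma + PySem.List.pyGetD (PySem.List.pyGetD matriz fila []) (columna + 1) 0 else suma
      let suma := if fila < (matriz.length : Int) - 1 then
        suma + PySem.List.pyGetD (PySem.List.pyGetD matriz (fila + 1) []) columna 0 else suma
      aux ++ [suma]) aux) []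

-- ===== PORT B =====
def sumaVecinos_alt (matriz : List (List Int)) : List Int :=
  let n := matriz.length
  let zeros : List Int := List.replicate (match matriz with
    | [] => 0
    | fila0 :: _ => fila0.length) 0
  (PySem.List.enumerate matriz).foldl (fun res p =>
    let i := p.1
    let fila := p.2
    let arriba := if i > 0 then PySem.List.pyGetD matriz (i - 1) [] else zeros
    let abajo := if i + 1 < (n : Int) then PySem.List.pyGetD matriz (i + 1) [] else zeros
    let izquierda := 0 :: PySem.List.slice fila none (some (-1))
    let derecha := PySem.List.slice fila (some 1) none ++ [0]
    res ++ (((arriba.zip abajo).zip (izquierda.zip derecha)).map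
      (fun q => q.1.1 + q.1.2 + q.2.1 + q.2.2))) []

-- ===== PRECONDITION & SPEC =====
-- Pre_ excludes ragged matrices (a row whose length differs from row 0's): there A either
-- raises IndexError or, when rows are longer, ignores/borrows elements according to the
-- accidental len(matriz[0]) convention, a corner no caller would specify.
def Pre_sumaVecinos (matriz : List (List Int)) : Prop :=
  ∀ fila ∈ matriz, fila.length = (matriz.getD 0 []).length
instance (matriz : List (List Int)) : Decidable (Pre_sumaVecinos matriz) := by
  unfold Pre_sumaVecinos; infer_instance
def pvWitness_sumaVecinos : List (List Int) := [[1, 2], [3, 4]]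
def Spec_sumaVecinos (matriz : List (List Int)) (out : List Int) : Prop := out = sumaVecinos_alt matriz
instance (matriz : List (List Int)) (out : List Int) : Decidable (Spec_sumaVecinos matriz out) := by unfold Spec_sumaVecinos; infer_instance

-- ===== CLAIM (what is proved, stated in full; the proofs are below) =====
def Claim_equal_sumaVecinos : Prop := ∀ (matriz : List (List Int)), Dom_sumaVecinos matriz → Pre_sumaVecinos matriz → Spec_sumaVecinos matriz (sumaVecinos matriz)

-- ===== LEMMAS AND PROOFS =====

/-- value at cell (i, j) of the matrix, 0-defaulted -/
def pvNb (matriz : List (List Int)) (i j : Nat) : Int := (matriz.getD i []).getD j 0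

/-- the neighbour sum A computes at cell (i, j) -/
def pvCell (matriz : List (List Int)) (i j : Nat) : Int :=
  (if 0 < i then pvNb matriz (i - 1) j else 0)
  + (if 0 < j then pvNb matriz i (j - 1) else 0)
  + (if (j : Int) < ((matriz.getD 0 []).length : Int) - 1 then pvNb matriz i (j + 1) else 0)
  + (if (i : Int) < (matriz.length : Int) - 1 then pvNb matriz (i + 1) j else 0)

theorem portA_eq (matriz : List (List Int)) :
    sumaVecinos matriz =
      (List.range matriz.length).flatMap (fun i =>
        (List.range (matriz.getD 0 []).length).map (fun j => pvCell matriz i j)) := by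
  unfold sumaVecinos
  rw [show (PySem.List.pyGetD matriz 0 []) = matriz.getD 0 [] by
        rw [show (0:Int) = ((0:Nat):Int) by rfl, PySem.List.pyGetD_natCast]]
  rw [PySem.List.pyRange_zero_natCast, PySem.List.pyRange_zero_natCast, List.foldl_map]
  rw [PySem.List.foldl_congr_mem (List.range matriz.length) _
        (fun aux fila => aux ++ (List.range (matriz.getD 0 []).length).map (fun j => pvCell matriz fila j)) []
        ?_]
  · exact PySem.List.foldl_append_eq_flatMap _ _ []
  · intro aux fila hfila
    rw [List.foldl_map, PySem.List.foldl_append_singleton_eq_map]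
    congr 1
    apply List.map_congr_left
    intro j hj
    simp only [gt_iff_lt, Int.natCast_pos, zero_add]
    split_ifs with h1 h2 h3 h4
    all_goals
      (try rw [show ((fila:Int) - 1) = (((fila-1:Nat)):Int) from by omega]
       try rw [show ((j:Int) - 1) = (((j-1:Nat)):Int) from by omega]
       try rw [show ((j:Int) + 1) = (((j+1:Nat)):Int) from by push_cast; ring]
       try rw [show ((fila:Int) + 1) = (((fila+1:Nat)):Int) from by push_cast; ring]
       simp only [PySem.List.pyGetD_natCast, pvCell, pvNb]
       split_ifs <;> ring)

theorem enumerate_eq (xs : List (List Int)) (s : Int) :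
    PySem.List.enumerate xs s =
      (List.range xs.length).map (fun (k : Nat) => (s + (k : Int), xs.getD k [])) := by
  induction xs generalizing s with
  | nil => simp [PySem.List.enumerate]
  | cons x t ih =>
    rw [PySem.List.enumerate, ih, List.length_cons, List.range_succ_eq_map]
    simp [List.map_map, Function.comp]
    intro a _
    ring

theorem eq_map_range (xs : List Int) (m : Nat) (hx : xs.length = m) :
    xs = (List.range m).map (fun j => xs.getD j 0) := by
  apply List.ext_getElem
  · simp [hx]
  · intro j hj hj2
    simp only [List.getElem_map, List.getElem_range,
      List.getD_eq_getElem _ _ (by omega : j < xs.length)]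

/-- B's zipped row equals the row of A's cell values (rectangular matrix, row k). -/
theorem rowB_eq (matriz : List (List Int)) (m : Nat)
    (hm : (matriz.getD 0 []).length = m)
    (hrow : ∀ fila ∈ matriz, fila.length = m)
    (k : Nat) (hk : k < matriz.length) :
    (((if 0 < k then matriz.getD (k-1) [] else List.replicate m (0:Int)).zip
      (if k + 1 < matriz.length then matriz.getD (k+1) [] else List.replicate m (0:Int))).zip
      (((0:Int) :: (matriz.getD k []).dropLast).zip ((matriz.getD k []).drop 1 ++ [(0:Int)]))).map
       (fun q => q.1.1 + q.1.2 + q.2.1 + q.2.2)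
    = (List.range m).map (fun j => pvCell matriz k j) := by
  have hlen : ∀ a, a < matriz.length → (matriz.getD a []).length = m := fun a ha => by
    rw [List.getD_eq_getElem _ _ ha]; exact hrow _ (List.getElem_mem ha)
  have hlenk := hlen k hk
  rcases Nat.eq_zero_or_pos m with hm0 | hmpos
  · subst hm0
    have hA : (if 0 < k then matriz.getD (k-1) [] else List.replicate 0 (0:Int)) = [] := by
      split_ifs with h
      · exact List.eq_nil_of_length_eq_zero (hlen _ (by omega))
      · rfl
    rw [hA]
    simp
  · have hA : (if 0 < k then matriz.getD (k-1) [] else List.replicate m (0:Int))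
        = (List.range m).map (fun (j : Nat) => if 0 < k then pvNb matriz (k-1) j else 0) := by
      split_ifs with h
      · exact eq_map_range _ _ (hlen _ (by omega))
      · simp [List.map_const']
    have hB : (if k + 1 < matriz.length then matriz.getD (k+1) [] else List.replicate m (0:Int))
        = (List.range m).map (fun (j : Nat) =>
            if (k:Int) < (matriz.length:Int) - 1 then pvNb matriz (k+1) j else 0) := by
      have hcond : (k + 1 < matriz.length) ↔ ((k:Int) < (matriz.length:Int) - 1) := by omega
      split_ifs with h h2 h2
      · exact eq_map_range _ _ (hlen _ (by omega))
      · exact absurd (hcond.mp h) h2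
      · exact absurd (hcond.mpr h2) h
      · simp [List.map_const']
    have hC : (0:Int) :: (matriz.getD k []).dropLast
        = (List.range m).map (fun (j : Nat) => if 0 < j then pvNb matriz k (j-1) else 0) := by
      apply List.ext_getElem
      · simp only [List.length_cons, List.length_dropLast, List.length_map, List.length_range, hlenk]
        omega
      · intro j hj hj2
        simp only [List.length_map, List.length_range] at hj2
        rcases j with _ | jj
        · simp
        · simp only [List.getElem_cons_succ, List.getElem_dropLast, List.getElem_map,
            List.getElem_range, Nat.add_sub_cancel, pvNb]
          rw [if_pos (Nat.succ_pos jj),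
            List.getD_eq_getElem _ _ (by omega : jj < (matriz.getD k []).length)]
    have hD : (matriz.getD k []).drop 1 ++ [(0:Int)]
        = (List.range m).map (fun (j : Nat) =>
            if (j : Int) < ((matriz.getD 0 []).length : Int) - 1 then pvNb matriz k (j+1) else 0) := by
      apply List.ext_getElem
      · simp only [List.length_append, List.length_drop, List.length_map, List.length_range,
          List.length_cons, List.length_nil, hlenk]
        omega
      · intro j hj hj2
        simp only [List.length_map, List.length_range] at hj2
        simp only [List.getElem_map, List.getElem_range, hm]
        by_cases hjm : j < m - 1
        · rw [List.getElem_append_left (by simp only [List.length_drop, hlenk]; omega),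
            if_pos (by omega)]
          simp only [List.getElem_drop, pvNb]
          rw [List.getD_eq_getElem _ _ (by omega : j + 1 < (matriz.getD k []).length)]
          congr 1
          omega
        · rw [List.getElem_append_right (by simp only [List.length_drop, hlenk]; omega),
            if_neg (by omega)]
          simp
    rw [hA, hB, hC, hD, List.zip_map', List.zip_map', List.zip_map', List.map_map]
    apply List.map_congr_left
    intro j hj
    simp only [Function.comp_apply, pvCell, hm]
    ring

theorem portB_eq (matriz : List (List Int)) (h : Pre_sumaVecinos matriz) :
    sumaVecinos_alt matriz =
      (List.range matriz.length).flatMap (fun i =>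
        (List.range (matriz.getD 0 []).length).map (fun j => pvCell matriz i j)) := by
  cases matriz with
  | nil => simp [sumaVecinos_alt, PySem.List.enumerate]
  | cons f0 rest =>
    unfold sumaVecinos_alt
    rw [enumerate_eq, List.foldl_map]
    rw [PySem.List.foldl_congr_mem (List.range (f0 :: rest).length) _
          (fun res k => res ++ (List.range ((f0 :: rest).getD 0 []).length).map
            (fun j => pvCell (f0 :: rest) k j)) [] ?_]
    · exact PySem.List.foldl_append_eq_flatMap _ _ []
    · intro acc k hkmem
      simp only [List.mem_range] at hkmem
      dsimp only
      congr 1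
      have hup : (if (0:Int) + (k:Int) > 0 then PySem.List.pyGetD (f0 :: rest) ((0:Int) + (k:Int) - 1) [] else List.replicate f0.length (0:Int))
          = (if 0 < k then (f0 :: rest).getD (k-1) [] else List.replicate f0.length (0:Int)) := by
        simp only [show ((0:Int) + (k:Int) > 0) ↔ (0 < k) from by omega]
        split_ifs with hk0
        · rw [show (0:Int) + (k:Int) - 1 = (((k-1:Nat)):Int) from by omega, PySem.List.pyGetD_natCast]
        · rfl
      have hdown : (if (0:Int) + (k:Int) + 1 < ((f0 :: rest).length : Int) then PySem.List.pyGetD (f0 :: rest) ((0:Int) + (k:Int) + 1) [] else List.replicate f0.length (0:Int))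
          = (if k + 1 < (f0 :: rest).length then (f0 :: rest).getD (k+1) [] else List.replicate f0.length (0:Int)) := by
        simp only [show ((0:Int) + (k:Int) + 1 < ((f0 :: rest).length : Int)) ↔ (k + 1 < (f0 :: rest).length) from by
          omega]
        split_ifs with hk1
        · rw [show (0:Int) + (k:Int) + 1 = (((k+1:Nat)):Int) from by omega, PySem.List.pyGetD_natCast]
        · rfl
      rw [hup, hdown, PySem.List.slice_to_neg_one,
        PySem.List.slice_from _ (by norm_num : (0:Int) ≤ 1)]
      simp only [Int.toNat_one]
      exact rowB_eq (f0 :: rest) f0.length rfl (fun fila hf => h fila hf) k hkmem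

-- ===== VERDICT (by name: the statement is the Claim_ definition above) =====
theorem sumaVecinos_spec : Claim_equal_sumaVecinos := by
  intro matriz _ hpre
  unfold Spec_sumaVecinos
  rw [portA_eq, portB_eq matriz hpre]
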